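-- pv_equiv track=rewrite | github.com/Lilweavs/advent-of-code-2021 | Day 25/main.py | stepDown
-- ===== SOURCE A (Python) =====
-- def stepDown(data):
--     i = 0
--     moved = False
--     while i < len(data[0]):
--         j = 0
--         tmp = len(data)-1
--         if data[j][i] != '.':
--             while data[tmp][i] == 'v':
--                 tmp -= 1
--
--         while j <= tmp:
--
--             if data[j][i] == 'v':
--                 while data[j][i] == 'v':
--                     j += 1
--                     if j > tmp:
--                         if data[0][i] == '.':
--                             data[j-1][i], data[0][i] = '.', 'v'
--                             moved = True
--                         break
--                     else:
--                         if data[j][i] == '.':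
--                             data[j-1][i], data[j][i] = '.', 'v'
--                             j += 1
--                             moved = True
--                     if j > tmp:
--                         break
--             else:
--                 j += 1
--         i += 1
--
--     return moved
-- ===== SOURCE B (Python) =====
-- # Gather-then-apply re-implementation: one clean scan collects every 'v' with a
-- # '.' below it (wrapping), then the moves are applied; same in-place mutation as A.
-- def stepDown(data):
--     rows = len(data)
--     cols = len(data[0])
--     moves = [(r, c) for r in range(rows) for c in range(cols)
--              if data[r][c] == 'v' and data[(r + 1) % rows][c] == '.']
--     for r, c in moves:
--         data[r][c] = '.'
--         data[(r + 1) % rows][c] = 'v'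
--     return bool(moves)
-- ===== Notes on version B (the rewrite author's own statement) =====
-- stated objective: simpler
-- what changed: A scans each column in place with a trim pointer and interleaved wrap-around bookkeeping, moving cucumbers while it scans; B does one gather pass (a single comprehension) collecting every (r,c) where a 'v' sits above a (wrapping) '.', then applies the collected moves and returns whether the list is nonempty.
-- crash fix: A raises IndexError on well-shaped grids containing a column made entirely of 'v' (its trim pointer runs off the top of the column); B returns whether any cucumber can move there. — e.g. on stepDown([["v"], ["v"]]): A raises IndexError, B returns false
import Mathlib
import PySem

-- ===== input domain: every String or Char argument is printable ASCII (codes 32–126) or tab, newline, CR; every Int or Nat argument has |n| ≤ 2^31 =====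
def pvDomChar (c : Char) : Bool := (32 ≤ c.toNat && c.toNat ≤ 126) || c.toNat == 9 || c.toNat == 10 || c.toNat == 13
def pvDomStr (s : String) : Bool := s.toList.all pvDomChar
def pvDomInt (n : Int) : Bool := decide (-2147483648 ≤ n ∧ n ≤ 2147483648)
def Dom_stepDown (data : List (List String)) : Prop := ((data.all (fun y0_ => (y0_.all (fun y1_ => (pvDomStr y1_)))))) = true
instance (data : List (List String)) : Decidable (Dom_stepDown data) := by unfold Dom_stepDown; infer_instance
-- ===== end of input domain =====

-- B replaces A's interleaved in-place column scanning (trim pointer, wrap bookkeeping) with one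
-- gather pass collecting all movable 'v's, then an apply pass; objective: simpler.
-- A mutates `data` in place; B performs the same in-place update, and the equivalence proved
-- here is about the RETURN value only.

-- ===== PORT A =====
def pvGc (d : List (List String)) (r c : Nat) : String := (d.getD r []).getD c ""

def pvSc (d : List (List String)) (r c : Nat) (v : String) : List (List String) :=
  d.set r ((d.getD r []).set c v)

def trimLoop : Nat → List (List String) → Nat → Nat → Nat
  | 0, _, _, tmp => tmp
  | fuel + 1, d, i, tmp => if pvGc d tmp i = "v" then trimLoop fuel d i (tmp - 1) else tmp

def innerLoop : Nat → List (List String) → Nat → Nat → Nat → Bool →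
    List (List String) × Nat × Bool
  | 0, d, _, _, j, moved => (d, j, moved)
  | fuel + 1, d, i, tmp, j, moved =>
    if pvGc d j i = "v" then
      if j + 1 > tmp then
        if pvGc d 0 i = "." then (pvSc (pvSc d j i ".") 0 i "v", j + 1, true)
        else (d, j + 1, moved)
      else
        if pvGc d (j + 1) i = "." then
          if j + 2 > tmp then (pvSc (pvSc d j i ".") (j + 1) i "v", j + 2, true)
          else innerLoop fuel (pvSc (pvSc d j i ".") (j + 1) i "v") i tmp (j + 2) true
        else
          if j + 1 > tmp then (d, j + 1, moved) else innerLoop fuel d i tmp (j + 1) moved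
    else (d, j, moved)

def middleLoop : Nat → List (List String) → Nat → Nat → Nat → Bool →
    List (List String) × Bool
  | 0, d, _, _, _, moved => (d, moved)
  | fuel + 1, d, i, tmp, j, moved =>
    if j ≤ tmp then
      if pvGc d j i = "v" then
        let t := innerLoop (d.length + 2) d i tmp j moved
        middleLoop fuel t.1 i tmp t.2.1 t.2.2
      else middleLoop fuel d i tmp (j + 1) moved
    else (d, moved)

def colStep (d : List (List String)) (i : Nat) (moved : Bool) : List (List String) × Bool :=
  let tmp0 := d.length - 1
  let tmp := if pvGc d 0 i ≠ "." then trimLoop d.length d i tmp0 else tmp0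
  middleLoop (d.length + 2) d i tmp 0 moved

def stepDown (data : List (List String)) : Bool :=
  ((List.range (data.getD 0 []).length).foldl
    (fun st i => colStep st.1 i st.2) (data, false)).2

-- ===== PORT B =====
-- Source B: gather all (r, c) with a 'v' above a (wrapping) '.', then apply them; the apply loop
-- only mutates `data` (not observable in the return value), so the port returns bool(moves).
def stepDown_alt (data : List (List String)) : Bool :=
  let rows := data.length
  let cols := (data.getD 0 []).length
  let moves := (List.range rows).flatMap (fun r =>
    (List.range cols).filterMap (fun c =>
      if pvGc data r c = "v" ∧ pvGc data ((r + 1) % rows) c = "." then some (r, c) else none))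
  !moves.isEmpty

-- ===== PRECONDITION & SPEC =====
-- Pre_ = exactly the inputs on which Python A returns: A raises IndexError on the empty grid,
-- on a row shorter than row 0, and on a column consisting entirely of "v" (its trim pointer
-- runs off the top of the column).
def Pre_stepDown (data : List (List String)) : Prop :=
  data ≠ [] ∧ (∀ row ∈ data, (data.getD 0 []).length ≤ row.length) ∧
  ∀ c < (data.getD 0 []).length, ∃ r < data.length, pvGc data r c ≠ "v"

instance (data : List (List String)) : Decidable (Pre_stepDown data) := by
  unfold Pre_stepDown; infer_instance

def pvWitness_stepDown : List (List String) := [["v"], ["."]]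

-- A raises IndexError on well-shaped grids containing an all-"v" column; B returns the plain
-- answer (whether any cucumber can move downward) there.
def Raises_stepDown (data : List (List String)) : Prop :=
  data ≠ [] ∧ (∀ row ∈ data, (data.getD 0 []).length ≤ row.length) ∧
  ∃ c < (data.getD 0 []).length, ∀ r < data.length, pvGc data r c = "v"

instance (data : List (List String)) : Decidable (Raises_stepDown data) := by
  unfold Raises_stepDown; infer_instance

def pvRaiseWitness_stepDown : List (List String) := [["v"], ["v"]]
def pvRaiseWitnessOut_stepDown : Bool := false

def Spec_stepDown (data : List (List String)) (out : Bool) : Prop := out = stepDown_alt data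
instance (data : List (List String)) (out : Bool) : Decidable (Spec_stepDown data out) := by
  unfold Spec_stepDown; infer_instance

-- ===== CLAIM (what is proved, stated in full; the proofs are below) =====
def Claim_equal_stepDown : Prop := ∀ (data : List (List String)),
  Dom_stepDown data → Pre_stepDown data → Spec_stepDown data (stepDown data)

def Claim_raises_stepDown : Prop :=
  (∀ (data : List (List String)), Dom_stepDown data → Raises_stepDown data → ¬ Pre_stepDown data) ∧
  (Dom_stepDown pvRaiseWitness_stepDown ∧ Raises_stepDown pvRaiseWitness_stepDown ∧
    stepDown_alt pvRaiseWitness_stepDown = pvRaiseWitnessOut_stepDown)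

-- ===== LEMMAS AND PROOFS =====
abbrev pvCond (g : List (List String)) (n c r : Nat) : Prop :=
  pvGc g r c = "v" ∧ pvGc g ((r + 1) % n) c = "."

def pvInv (d g : List (List String)) (i j : Nat) : Prop :=
  (∀ r, j ≤ r → pvGc d r i = pvGc g r i) ∧ (pvGc g 0 i = "." → pvGc d 0 i = ".")

def pvCEq (d d0 : List (List String)) (i : Nat) : Prop :=
  ∀ r c, c ≠ i → pvGc d r c = pvGc d0 r c

theorem pvGc_pvSc_of_ne (d : List (List String)) (r c : Nat) (v : String) (r' c' : Nat)
    (h : r' ≠ r ∨ c' ≠ c) : pvGc (pvSc d r c v) r' c' = pvGc d r' c' := by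
  rcases h with h | h
  · simp [pvGc, pvSc, List.getD_eq_getElem?_getD, List.getElem?_set_ne (Ne.symm h)]
  · by_cases hr : r' = r
    · subst hr
      simp [pvGc, pvSc, List.getD_eq_getElem?_getD, List.getElem?_set]
      split
      · simp [List.getElem?_set_ne (Ne.symm h)]
      · next hge => rw [List.getElem?_eq_none (Nat.le_of_not_lt hge)]
    · simp [pvGc, pvSc, List.getD_eq_getElem?_getD, List.getElem?_set_ne (Ne.symm hr)]

theorem pvSc_length (d : List (List String)) (r c : Nat) (v : String) :
    (pvSc d r c v).length = d.length := by
  simp [pvSc]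

theorem trim_spec (d : List (List String)) (i : Nat) :
    ∀ fuel t, (∃ s, s ≤ t ∧ pvGc d s i ≠ "v") → t < fuel →
      pvGc d (trimLoop fuel d i t) i ≠ "v" ∧ trimLoop fuel d i t ≤ t ∧
      ∀ r, trimLoop fuel d i t < r → r ≤ t → pvGc d r i = "v" := by
  intro fuel
  induction fuel with
  | zero => intro t _ hf; exact absurd hf (Nat.not_lt_zero t)
  | succ fuel ih =>
    intro t h hf
    by_cases hv : pvGc d t i = "v"
    · obtain ⟨s, hs, hns⟩ := h
      have hst : s ≠ t := fun he => hns (he ▸ hv)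
      obtain ⟨c1, c2, c3⟩ := ih (t - 1) ⟨s, by omega, hns⟩ (by omega)
      simp only [trimLoop, if_pos hv]
      refine ⟨c1, by omega, fun r h1 h2 => ?_⟩
      rcases Nat.lt_or_ge r t with hr | hr
      · exact c3 r h1 (by omega)
      · have : r = t := by omega
        exact this ▸ hv
    · simp only [trimLoop, if_neg hv]
      exact ⟨hv, le_refl t, fun r h1 h2 => absurd (by omega : t < t) (lt_irrefl t)⟩

theorem inner_spec (g : List (List String)) (i n tmp : Nat) (hn : 0 < n) (htmp : tmp < n)
    (H2 : pvGc g tmp i = "v" → tmp = n - 1 ∧ pvGc g 0 i = ".") :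
    ∀ fuel d j m, pvInv d g i j → j ≤ tmp → tmp + 2 ≤ fuel + j →
      ∃ d' j' m', innerLoop fuel d i tmp j m = (d', j', m') ∧
        d'.length = d.length ∧ j ≤ j' ∧ (pvGc g j i = "v" → j < j') ∧
        (j' ≤ tmp → pvInv d' g i j') ∧ pvCEq d' d i ∧
        m' = (m || decide (∃ r < j', j ≤ r ∧ r ≤ tmp ∧ pvCond g n i r)) := by
  intro fuel
  induction fuel with
  | zero => intro d j m _ hj hf; omega
  | succ fuel ih =>
    intro d j m hInv hj hf
    have hread : pvGc d j i = pvGc g j i := hInv.1 j (le_refl j)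
    by_cases hv : pvGc g j i = "v"
    · by_cases hjt : j + 1 > tmp
      · -- j = tmp : the wrap branch
        have hjtmp : j = tmp := by omega
        obtain ⟨htn, h0⟩ := H2 (hjtmp ▸ hv)
        have hd0 : pvGc d 0 i = "." := hInv.2 h0
        refine ⟨pvSc (pvSc d j i ".") 0 i "v", j + 1, true, ?_, ?_, by omega,
          fun _ => by omega, fun h => absurd h (by omega), ?_, ?_⟩
        · simp only [innerLoop, hread, if_pos hv, if_pos hjt, if_pos hd0]
        · rw [pvSc_length, pvSc_length]
        · intro r c hc
          rw [pvGc_pvSc_of_ne _ _ _ _ _ _ (Or.inr hc), pvGc_pvSc_of_ne _ _ _ _ _ _ (Or.inr hc)]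
        · have hcond : pvCond g n i j := by
            refine ⟨hv, ?_⟩
            have : (j + 1) % n = 0 := by
              have : j + 1 = n := by omega
              simp [this]
            rw [this]; exact h0
          have h : (∃ r < j + 1, j ≤ r ∧ r ≤ tmp ∧ pvCond g n i r) := ⟨j, by omega, le_refl j, hj, hcond⟩
          rw [decide_eq_true h, Bool.or_true]
      · -- j + 1 ≤ tmp
        have hread2 : pvGc d (j + 1) i = pvGc g (j + 1) i := hInv.1 _ (by omega)
        have hmod : (j + 1) % n = j + 1 := Nat.mod_eq_of_lt (by omega)
        by_cases hdot : pvGc g (j + 1) i = "."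
        · -- a move happens at j
          have hcond : pvCond g n i j := ⟨hv, by rw [hmod]; exact hdot⟩
          by_cases hj2 : j + 2 > tmp
          · refine ⟨pvSc (pvSc d j i ".") (j + 1) i "v", j + 2, true, ?_, ?_, by omega,
              fun _ => by omega, fun h => absurd h (by omega), ?_, ?_⟩
            · simp only [innerLoop, hread, hread2, if_pos hv, if_neg hjt, if_pos hdot, if_pos hj2]
            · rw [pvSc_length, pvSc_length]
            · intro r c hc
              rw [pvGc_pvSc_of_ne _ _ _ _ _ _ (Or.inr hc), pvGc_pvSc_of_ne _ _ _ _ _ _ (Or.inr hc)]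
            · have h : (∃ r < j + 2, j ≤ r ∧ r ≤ tmp ∧ pvCond g n i r) :=
                ⟨j, by omega, le_refl j, hj, hcond⟩
              rw [decide_eq_true h, Bool.or_true]
          · -- move then continue scanning
            set d2 := pvSc (pvSc d j i ".") (j + 1) i "v" with hd2
            have hInv2 : pvInv d2 g i (j + 2) := by
              constructor
              · intro r hr
                rw [pvGc_pvSc_of_ne _ _ _ _ _ _ (Or.inl (by omega)),
                  pvGc_pvSc_of_ne _ _ _ _ _ _ (Or.inl (by omega))]
                exact hInv.1 r (by omega)
              · intro h0
                have hj0 : j ≠ 0 := by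
                  intro he; rw [he] at hv; rw [hv] at h0; exact absurd h0 (by decide)
                rw [pvGc_pvSc_of_ne _ _ _ _ _ _ (Or.inl (by omega)),
                  pvGc_pvSc_of_ne _ _ _ _ _ _ (Or.inl (Ne.symm hj0))]
                exact hInv.2 h0
            obtain ⟨d', j', m', heq, hlen, hjle, _, hInv', hCEq, hm⟩ :=
              ih d2 (j + 2) true hInv2 (by omega) (by omega)
            refine ⟨d', j', m', ?_, ?_, by omega, fun _ => by omega, hInv', ?_, ?_⟩
            · simp only [innerLoop, hread, hread2, if_pos hv, if_neg hjt, if_pos hdot, if_neg hj2]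
              exact heq
            · rw [hlen, hd2, pvSc_length, pvSc_length]
            · intro r c hc
              rw [hCEq r c hc, pvGc_pvSc_of_ne _ _ _ _ _ _ (Or.inr hc),
                pvGc_pvSc_of_ne _ _ _ _ _ _ (Or.inr hc)]
            · have hE : (∃ r < j', j ≤ r ∧ r ≤ tmp ∧ pvCond g n i r) :=
                ⟨j, by omega, le_refl j, hj, hcond⟩
            -- m' = true || … = true, target m || decide(...) with nonempty witness
              rw [hm, Bool.true_or, decide_eq_true hE, Bool.or_true]
        · -- blocker right below the 'v': loop advances to j+1 and re-enters
          have hInv1 : pvInv d g i (j + 1) := ⟨fun r hr => hInv.1 r (by omega), hInv.2⟩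
          obtain ⟨d', j', m', heq, hlen, hjle, _, hInv', hCEq, hm⟩ :=
            ih d (j + 1) m hInv1 (by omega) (by omega)
          refine ⟨d', j', m', ?_, hlen, by omega, fun _ => by omega, hInv', hCEq, ?_⟩
          · simp only [innerLoop, hread, hread2, if_pos hv, if_neg hjt, if_neg hdot]
            exact heq
          · rw [hm]
            congr 1
            rw [decide_eq_decide]
            constructor
            · rintro ⟨r, h1, h2, h3, h4⟩
              exact ⟨r, h1, by omega, h3, h4⟩
            · rintro ⟨r, h1, h2, h3, h4⟩
              by_cases hrj : r = j
              · have h42 := h4.2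
                rw [hrj, hmod] at h42
                exact absurd h42 hdot
              · exact ⟨r, h1, by omega, h3, h4⟩
    · -- head is not 'v': immediate exit
      refine ⟨d, j, m, ?_, rfl, le_refl j, fun h => absurd h hv, fun _ => hInv,
        fun _ _ _ => rfl, ?_⟩
      · simp only [innerLoop, hread, if_neg hv]
      · have : ¬(∃ r < j, j ≤ r ∧ r ≤ tmp ∧ pvCond g n i r) := by
          rintro ⟨r, h1, h2, _⟩; omega
        rw [decide_eq_false this, Bool.or_false]

theorem middle_exit (fuel : Nat) (d : List (List String)) (i tmp j : Nat) (m : Bool)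
    (h : ¬ j ≤ tmp) : middleLoop fuel d i tmp j m = (d, m) := by
  cases fuel with
  | zero => rfl
  | succ fuel => simp only [middleLoop, if_neg h]

theorem middle_spec (g : List (List String)) (i n tmp : Nat) (hn : 0 < n) (htmp : tmp < n)
    (H2 : pvGc g tmp i = "v" → tmp = n - 1 ∧ pvGc g 0 i = ".") :
    ∀ fuel d j m, d.length = n → pvInv d g i j → tmp + 2 ≤ fuel + j →
      ∃ d' m', middleLoop fuel d i tmp j m = (d', m') ∧
        d'.length = d.length ∧ pvCEq d' d i ∧
        m' = (m || decide (∃ r < tmp + 1, j ≤ r ∧ pvCond g n i r)) := by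
  intro fuel
  induction fuel with
  | zero =>
    intro d j m _ _ hf
    refine ⟨d, m, rfl, rfl, fun _ _ _ => rfl, ?_⟩
    have : ¬(∃ r < tmp + 1, j ≤ r ∧ pvCond g n i r) := by rintro ⟨r, h1, h2, _⟩; omega
    rw [decide_eq_false this, Bool.or_false]
  | succ fuel ih =>
    intro d j m hd hInv hf
    by_cases hjt : j ≤ tmp
    · have hread : pvGc d j i = pvGc g j i := hInv.1 j (le_refl j)
      by_cases hv : pvGc g j i = "v"
      · obtain ⟨d2, j2, m2, heq, hlen2, hjle2, hprog, hInv2, hCEq2, hm2⟩ :=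
          inner_spec g i n tmp hn htmp H2 (d.length + 2) d j m hInv hjt (by omega)
        have hstep : middleLoop (fuel + 1) d i tmp j m = middleLoop fuel d2 i tmp j2 m2 := by
          simp only [middleLoop, if_pos hjt, hread, if_pos hv, heq]
        have hj2 : j < j2 := hprog hv
        by_cases hj2t : j2 ≤ tmp
        · obtain ⟨d', m', heq', hlen', hCEq', hm'⟩ :=
            ih d2 j2 m2 (hlen2.trans hd) (hInv2 hj2t) (by omega)
          refine ⟨d', m', hstep.trans heq', hlen'.trans hlen2, ?_, ?_⟩
          · intro r c hc; rw [hCEq' r c hc, hCEq2 r c hc]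
          · rw [hm', hm2, Bool.or_assoc, ← Bool.decide_or]
            congr 1
            rw [decide_eq_decide]
            constructor
            · rintro (⟨r, h1, h2, h3, h4⟩ | ⟨r, h1, h2, h4⟩)
              · exact ⟨r, by omega, h2, h4⟩
              · exact ⟨r, h1, by omega, h4⟩
            · rintro ⟨r, h1, h2, h4⟩
              by_cases hrj : r < j2
              · exact Or.inl ⟨r, hrj, h2, by omega, h4⟩
              · exact Or.inr ⟨r, h1, by omega, h4⟩
        · refine ⟨d2, m2, hstep.trans (middle_exit fuel d2 i tmp j2 m2 hj2t), hlen2, hCEq2, ?_⟩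
          rw [hm2]
          congr 1
          rw [decide_eq_decide]
          constructor
          · rintro ⟨r, h1, h2, h3, h4⟩
            exact ⟨r, by omega, h2, h4⟩
          · rintro ⟨r, h1, h2, h4⟩
            exact ⟨r, by omega, h2, by omega, h4⟩
      · obtain ⟨d', m', heq', hlen', hCEq', hm'⟩ :=
          ih d (j + 1) m hd ⟨fun r hr => hInv.1 r (by omega), hInv.2⟩ (by omega)
        have hstep : middleLoop (fuel + 1) d i tmp j m = middleLoop fuel d i tmp (j + 1) m := by
          simp only [middleLoop, if_pos hjt, hread, if_neg hv]
        refine ⟨d', m', hstep.trans heq', hlen', hCEq', ?_⟩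
        rw [hm']
        congr 1
        rw [decide_eq_decide]
        constructor
        · rintro ⟨r, h1, h2, h4⟩
          exact ⟨r, h1, by omega, h4⟩
        · rintro ⟨r, h1, h2, h4⟩
          by_cases hrj : r = j
          · rw [hrj] at h4; exact absurd h4.1 hv
          · exact ⟨r, h1, by omega, h4⟩
    · refine ⟨d, m, by simp only [middleLoop, if_neg hjt], rfl, fun _ _ _ => rfl, ?_⟩
      have : ¬(∃ r < tmp + 1, j ≤ r ∧ pvCond g n i r) := by rintro ⟨r, h1, h2, _⟩; omega
      rw [decide_eq_false this, Bool.or_false]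

theorem col_spec (d : List (List String)) (i : Nat) (m : Bool) (hn : 0 < d.length)
    (Hnv : ∃ r < d.length, pvGc d r i ≠ "v") :
    ∃ d' m', colStep d i m = (d', m') ∧ d'.length = d.length ∧ pvCEq d' d i ∧
      m' = (m || decide (∃ r < d.length, pvCond d d.length i r)) := by
  have hInv0 : pvInv d d i 0 := ⟨fun _ _ => rfl, fun h => h⟩
  by_cases h0 : pvGc d 0 i = "."
  · have hcol : colStep d i m =
        middleLoop (d.length + 2) d i (d.length - 1) 0 m := by
      simp [colStep, h0]
    obtain ⟨d', m', heq, hlen, hCEq, hm⟩ :=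
      middle_spec d i d.length (d.length - 1) hn (by omega)
        (fun h => ⟨rfl, h0⟩) (d.length + 2) d 0 m rfl hInv0 (by omega)
    refine ⟨d', m', hcol.trans heq, hlen, hCEq, ?_⟩
    rw [hm]
    congr 1
    rw [decide_eq_decide]
    constructor
    · rintro ⟨r, h1, _, h4⟩; exact ⟨r, by omega, h4⟩
    · rintro ⟨r, h1, h4⟩; exact ⟨r, by omega, by omega, h4⟩
  · obtain ⟨s, hs, hnsv⟩ := Hnv
    obtain ⟨c1, c2, c3⟩ := trim_spec d i d.length (d.length - 1) ⟨s, by omega, hnsv⟩ (by omega)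
    have hcol : colStep d i m =
        middleLoop (d.length + 2) d i (trimLoop d.length d i (d.length - 1)) 0 m := by
      simp [colStep, h0]
    obtain ⟨d', m', heq, hlen, hCEq, hm⟩ :=
      middle_spec d i d.length (trimLoop d.length d i (d.length - 1)) hn (by omega)
        (fun h => absurd h c1) (d.length + 2) d 0 m rfl hInv0 (by omega)
    refine ⟨d', m', hcol.trans heq, hlen, hCEq, ?_⟩
    rw [hm]
    congr 1
    rw [decide_eq_decide]
    constructor
    · rintro ⟨r, h1, _, h4⟩; exact ⟨r, by omega, h4⟩
    · rintro ⟨r, h1, h4⟩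
      refine ⟨r, ?_, by omega, h4⟩
      by_contra hgt
      have hrv : r + 1 ≤ d.length - 1 ∨ r = d.length - 1 := by omega
      rcases hrv with hlt | hend
      · have : pvGc d ((r + 1) % d.length) i = "v" := by
          rw [Nat.mod_eq_of_lt (by omega)]
          exact c3 (r + 1) (by omega) (by omega)
        rw [h4.2] at this
        exact absurd this (by decide)
      · have hmod0 : (r + 1) % d.length = 0 := by
          have : r + 1 = d.length := by omega
          simp [this]
        have h42 := h4.2
        rw [hmod0] at h42
        exact h0 h42

theorem outer_spec (data : List (List String)) (hn : 0 < data.length) :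
    ∀ (L : List Nat), L.Nodup → ∀ d m, d.length = data.length →
      (∀ c ∈ L, ∀ r, pvGc d r c = pvGc data r c) →
      (∀ c ∈ L, ∃ r < data.length, pvGc data r c ≠ "v") →
      (L.foldl (fun st i => colStep st.1 i st.2) (d, m)).2 =
        (m || decide (∃ c ∈ L, ∃ r < data.length, pvCond data data.length c r)) := by
  intro L
  induction L with
  | nil =>
    intro _ d m _ _ _
    simp
  | cons c L' ih =>
    intro hnd d m hlen hcols hnv
    have hcol : ∀ r, pvGc d r c = pvGc data r c := hcols c (List.mem_cons_self ..)
    obtain ⟨r0, hr0, hr0v⟩ := hnv c (List.mem_cons_self ..)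
    obtain ⟨d2, m2, heq, hlen2, hCEq2, hm2⟩ :=
      col_spec d c m (hlen ▸ hn) ⟨r0, hlen ▸ hr0, by rw [hcol r0]; exact hr0v⟩
    have hcond : ∀ r, pvCond d d.length c r ↔ pvCond data data.length c r := by
      intro r
      unfold pvCond
      rw [hcol r, hlen, hcol ((r + 1) % data.length)]
    have hstep : (c :: L').foldl (fun st i => colStep st.1 i st.2) (d, m) =
        L'.foldl (fun st i => colStep st.1 i st.2) (d2, m2) := by
      simp only [List.foldl_cons, heq]
    rw [hstep, ih (List.nodup_cons.mp hnd).2 d2 m2 (hlen2.trans hlen)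
      (fun c' hc' r => by
        rw [hCEq2 r c' (fun he => (List.nodup_cons.mp hnd).1 (he ▸ hc'))]
        exact hcols c' (List.mem_cons_of_mem c hc') r)
      (fun c' hc' => hnv c' (List.mem_cons_of_mem c hc')), hm2, Bool.or_assoc, ← Bool.decide_or]
    congr 1
    rw [decide_eq_decide]
    constructor
    · rintro (⟨r, h1, h4⟩ | ⟨c', hc', r, h1, h4⟩)
      · exact ⟨c, List.mem_cons_self .., r, hlen ▸ h1, (hcond r).mp h4⟩
      · exact ⟨c', List.mem_cons_of_mem c hc', r, h1, h4⟩
    · rintro ⟨c', hc', r, h1, h4⟩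
      rcases List.mem_cons.mp hc' with he | hm
      · exact Or.inl ⟨r, hlen ▸ h1, (hcond r).mpr (he ▸ h4)⟩
      · exact Or.inr ⟨c', hm, r, h1, h4⟩

theorem alt_spec (data : List (List String)) :
    stepDown_alt data = decide (∃ r < data.length, ∃ c < (data.getD 0 []).length,
      pvCond data data.length c r) := by
  rw [Bool.eq_iff_iff]
  rw [decide_eq_true_iff]
  simp only [stepDown_alt, Bool.not_eq_true']
  rw [List.isEmpty_eq_false_iff]
  constructor
  · intro h
    obtain ⟨x, hx⟩ := List.exists_mem_of_ne_nil _ h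
    obtain ⟨r, hr, hx2⟩ := List.mem_flatMap.mp hx
    obtain ⟨c, hc, hx3⟩ := List.mem_filterMap.mp hx2
    rw [List.mem_range] at hr hc
    by_cases hP : pvGc data r c = "v" ∧ pvGc data ((r + 1) % data.length) c = "."
    · exact ⟨r, hr, c, hc, hP.1, hP.2⟩
    · rw [if_neg hP] at hx3; exact absurd hx3 (by simp)
  · rintro ⟨r, hr, c, hc, hP⟩
    refine List.ne_nil_of_mem (a := (r, c)) ?_
    refine List.mem_flatMap.mpr ⟨r, List.mem_range.mpr hr, ?_⟩
    refine List.mem_filterMap.mpr ⟨c, List.mem_range.mpr hc, ?_⟩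
    rw [if_pos (And.intro hP.1 hP.2)]

-- ===== VERDICT (by name: the statement is the Claim_ definition above) =====
theorem stepDown_spec : Claim_equal_stepDown := by
  intro data _ hpre
  obtain ⟨hne, _, hnv⟩ := hpre
  have hn : 0 < data.length := List.length_pos_of_ne_nil hne
  unfold Spec_stepDown
  rw [alt_spec]
  have h := outer_spec data hn (List.range (data.getD 0 []).length) List.nodup_range
    data false rfl (fun _ _ _ => rfl) (fun c hc => hnv c (List.mem_range.mp hc))
  rw [Bool.false_or] at h
  unfold stepDown
  rw [h]
  rw [decide_eq_decide]
  constructor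
  · rintro ⟨c, hc, r, hr, h4⟩
    exact ⟨r, hr, c, List.mem_range.mp hc, h4⟩
  · rintro ⟨r, hr, c, hc, h4⟩
    exact ⟨c, List.mem_range.mpr hc, r, hr, h4⟩

def stepDown_raises : Claim_raises_stepDown := by
  unfold Claim_raises_stepDown
  refine ⟨?_, by decide⟩
  rintro data _ ⟨_, _, c, hc, hall⟩ ⟨_, _, hnv⟩
  obtain ⟨r, hr, hneq⟩ := hnv c hc
  exact hneq (hall r hr)
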